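-- pv_equiv track=rewrite | github.com/SteveJaman/Indoor-MR-Assist-LV | visual_test.py | format_group
-- ===== SOURCE A (Python) =====
-- def add_article(word):
--     return f"an {word}" if word.lower().startswith(('a','e','i','o','u')) else f"a {word}"
--
-- def format_group(items_with_data, direction):
--     if not items_with_data: return None
--     sorted_items = sorted(items_with_data, key=lambda x: x[1])
--     seen, top_items = set(), []
--     for label, dist in sorted_items:
--         if label not in seen:
--             top_items.append(f"{add_article(label)} at {dist} feet")
--             seen.add(label)
--         if len(top_items) == 4: break
--     if not top_items: return None
--     if len(top_items) == 1: item_string = top_items[0]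
--     else: item_string = ", ".join(top_items[:-1]) + f", and {top_items[-1]}"
--     return f"{item_string} {direction}"
-- ===== SOURCE B (Python) =====
-- def add_article(word):
--     return f"an {word}" if word[:1].lower() in ('a', 'e', 'i', 'o', 'u') else f"a {word}"
--
-- def format_group(items_with_data, direction):
--     if not items_with_data:
--         return None
--     # repeatedly extract the closest remaining item (first minimal on ties),
--     # then drop every occurrence of that label -- no sort, no seen-set
--     pool = items_with_data
--     parts = []
--     for _ in range(4):
--         if not pool:
--             break
--         label, dist = min(pool, key=lambda x: x[1])
--         parts.append(f"{add_article(label)} at {dist} feet")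
--         pool = [p for p in pool if p[0] != label]
--     out = parts[0]
--     for j in range(1, len(parts)):
--         out += (", and " if j == len(parts) - 1 else ", ") + parts[j]
--     return f"{out} {direction}"
-- ===== Notes on version B (the rewrite author's own statement) =====
-- stated objective: alternative
-- what changed: B replaces A's stable sort plus seen-set dedup scan by up to four rounds of first-minimum extraction with label filtering, and builds the sentence in one accumulating pass instead of slice-join plus negative indexing.
import Mathlib
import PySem

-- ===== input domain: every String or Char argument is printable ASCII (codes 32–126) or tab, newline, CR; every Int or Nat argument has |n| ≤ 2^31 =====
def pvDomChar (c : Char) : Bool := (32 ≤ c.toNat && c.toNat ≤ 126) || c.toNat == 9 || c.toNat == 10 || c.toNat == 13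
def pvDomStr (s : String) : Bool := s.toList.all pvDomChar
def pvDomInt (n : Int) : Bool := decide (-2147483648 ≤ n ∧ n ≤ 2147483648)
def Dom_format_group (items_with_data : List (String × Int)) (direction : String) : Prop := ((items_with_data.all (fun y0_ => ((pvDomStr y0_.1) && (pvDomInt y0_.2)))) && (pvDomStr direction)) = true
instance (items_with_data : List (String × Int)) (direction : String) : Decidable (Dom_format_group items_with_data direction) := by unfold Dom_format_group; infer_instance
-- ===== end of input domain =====

-- B replaces A's stable sort + seen-set dedup scan by repeated first-minimum extraction with
-- label filtering, and builds the sentence in one accumulating pass (objective: alternative).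

-- ===== PORT A =====
def pvAddArticle (word : String) : String :=
  if PySem.Str.startswith (PySem.Str.lower word) "a" || PySem.Str.startswith (PySem.Str.lower word) "e" ||
     PySem.Str.startswith (PySem.Str.lower word) "i" || PySem.Str.startswith (PySem.Str.lower word) "o" ||
     PySem.Str.startswith (PySem.Str.lower word) "u"
  then "an " ++ word else "a " ++ word

-- the for-loop of A, with its seen-set, append and 'break' at 4 items
def pvALoop (seen : PySem.Set String) (top : List String) : List (String × Int) → List String
  | [] => top
  | (label, dist) :: rest =>
    let st :=
      if PySem.Set.contains seen label then (seen, top)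
      else (PySem.Set.add seen label,
            top ++ [pvAddArticle label ++ " at " ++ PySem.Int.toStr dist ++ " feet"])
    if st.2.length == 4 then st.2 else pvALoop st.1 st.2 rest

def format_group (items_with_data : List (String × Int)) (direction : String) : Option String :=
  if items_with_data = [] then none
  else
    let sorted_items := PySem.List.sorted items_with_data (fun x => x.2) false
    let top_items := pvALoop PySem.Set.empty [] sorted_items
    if top_items = [] then none
    else
      let item_string :=
        if top_items.length == 1 then PySem.List.pyGetD top_items 0 ""
        else PySem.Str.join ", " (PySem.List.slice top_items none (some (-1))) ++ ", and " ++
             PySem.List.pyGetD top_items (-1) ""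
      some (item_string ++ " " ++ direction)

-- ===== PORT B =====
def pvAddArticleB (word : String) : String :=
  if PySem.Str.lower (PySem.Str.slice word none (some 1)) = "a" ∨
     PySem.Str.lower (PySem.Str.slice word none (some 1)) = "e" ∨
     PySem.Str.lower (PySem.Str.slice word none (some 1)) = "i" ∨
     PySem.Str.lower (PySem.Str.slice word none (some 1)) = "o" ∨
     PySem.Str.lower (PySem.Str.slice word none (some 1)) = "u"
  then "an " ++ word else "a " ++ word

-- B's selection loop: up to k times, take the first minimal-distance item, drop its label
def pvBSelect : List (String × Int) → Nat → List String
  | _, 0 => []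
  | pool, Nat.succ k =>
    match PySem.List.min? pool (fun x => x.2) with
    | none => []
    | some (label, dist) =>
      (pvAddArticleB label ++ " at " ++ PySem.Int.toStr dist ++ " feet") ::
        pvBSelect (pool.filter (fun p => p.1 != label)) k

def format_group_alt (items_with_data : List (String × Int)) (direction : String) : Option String :=
  if items_with_data = [] then none
  else
    let parts := pvBSelect items_with_data 4
    let out :=
      (PySem.List.pyRange 1 (parts.length : Int) 1).foldl
        (fun out j =>
          out ++ (if j == (parts.length : Int) - 1 then ", and " else ", ") ++
            PySem.List.pyGetD parts j "")
        (PySem.List.pyGetD parts 0 "")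
    some (out ++ " " ++ direction)

-- ===== PRECONDITION & SPEC =====
def Spec_format_group (items_with_data : List (String × Int)) (direction : String) (out : Option String) : Prop := out = format_group_alt items_with_data direction
instance (items_with_data : List (String × Int)) (direction : String) (out : Option String) : Decidable (Spec_format_group items_with_data direction out) := by unfold Spec_format_group; infer_instance

-- ===== CLAIM (what is proved, stated in full; the proofs are below) =====
def Claim_equal_format_group : Prop := ∀ (items_with_data : List (String × Int)) (direction : String), Dom_format_group items_with_data direction → Spec_format_group items_with_data direction (format_group items_with_data direction)

-- ===== LEMMAS AND PROOFS =====

-- two strings are equal iff their char lists are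
theorem pv_str_ext {s t : String} (h : s.toList = t.toList) : s = t := by
  have := congrArg String.ofList h
  simpa using this

theorem pv_ofList_eq_iff (l r : List Char) : (String.ofList l = String.ofList r) ↔ l = r := by
  constructor
  · intro h; have := congrArg String.toList h; simpa using this
  · intro h; rw [h]

-- the two article helpers agree
theorem pv_article_eq (w : String) : pvAddArticle w = pvAddArticleB w := by
  unfold pvAddArticle pvAddArticleB
  have e1 : ("a" : String) = String.ofList ['a'] := by decide
  have e2 : ("e" : String) = String.ofList ['e'] := by decide
  have e3 : ("i" : String) = String.ofList ['i'] := by decide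
  have e4 : ("o" : String) = String.ofList ['o'] := by decide
  have e5 : ("u" : String) = String.ofList ['u'] := by decide
  rcases hl : w.toList with _ | ⟨c, cs⟩
  · have hA : ∀ p : String, PySem.Str.startswith (PySem.Str.lower w) p = p.toList.isPrefixOf [] := by
      intro p
      simp [PySem.Str.startswith_eq, PySem.Chars.startswith, PySem.Chars.lower, hl]
    have hB0 : PySem.Str.lower (PySem.Str.slice w none (some 1)) = String.ofList [] := by
      apply pv_str_ext
      simp [PySem.Str.lower, PySem.Str.slice, PySem.Chars.lower, PySem.List.slice, hl]
    rw [e1, e2, e3, e4, e5, hB0]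
    simp [hA, pv_ofList_eq_iff, List.isPrefixOf, PySem.Chars.startswith, PySem.Chars.lower, hl]
  · have hA : ∀ v : Char, PySem.Str.startswith (PySem.Str.lower w) (String.ofList [v])
        = (v == PySem.Chars.lowerChar c) := by
      intro v
      simp [PySem.Str.startswith_eq, PySem.Chars.startswith, PySem.Chars.lower, hl,
        List.isPrefixOf]
    have hmin1 : min 1 (cs.length + 1) = 1 := by omega
    have hBs : PySem.Str.lower (PySem.Str.slice w none (some 1))
        = String.ofList [PySem.Chars.lowerChar c] := by
      apply pv_str_ext
      simp [PySem.Str.lower, PySem.Str.slice, PySem.Chars.lower, PySem.List.slice, hl, hmin1]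
    rw [e1, e2, e3, e4, e5, hBs]
    simp only [hA, pv_ofList_eq_iff]
    by_cases hc : PySem.Chars.lowerChar c = 'a' ∨ PySem.Chars.lowerChar c = 'e' ∨
        PySem.Chars.lowerChar c = 'i' ∨ PySem.Chars.lowerChar c = 'o' ∨ PySem.Chars.lowerChar c = 'u'
    · rcases hc with h | h | h | h | h <;> simp [h]
    · push_neg at hc
      obtain ⟨n1, n2, n3, n4, n5⟩ := hc
      have m1 : ('a' == PySem.Chars.lowerChar c) = false := by
        rw [beq_eq_false_iff_ne]; exact fun h => n1 h.symm
      have m2 : ('e' == PySem.Chars.lowerChar c) = false := by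
        rw [beq_eq_false_iff_ne]; exact fun h => n2 h.symm
      have m3 : ('i' == PySem.Chars.lowerChar c) = false := by
        rw [beq_eq_false_iff_ne]; exact fun h => n3 h.symm
      have m4 : ('o' == PySem.Chars.lowerChar c) = false := by
        rw [beq_eq_false_iff_ne]; exact fun h => n4 h.symm
      have m5 : ('u' == PySem.Chars.lowerChar c) = false := by
        rw [beq_eq_false_iff_ne]; exact fun h => n5 h.symm
      simp [m1, m2, m3, m4, m5, n1, n2, n3, n4, n5]

theorem pv_min?_append_none (xs : List (String × Int)) (x : String × Int)
    (h : PySem.List.min? xs (fun y => y.2) = none) :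
    PySem.List.min? (xs ++ [x]) (fun y => y.2) = some x := by
  rw [PySem.List.min?] at h ⊢
  rw [List.foldl_append]
  simp only [List.foldl_cons, List.foldl_nil, h]

theorem pv_min?_append_some (xs : List (String × Int)) (x m : String × Int)
    (h : PySem.List.min? xs (fun y => y.2) = some m) :
    PySem.List.min? (xs ++ [x]) (fun y => y.2)
      = if x.2 < m.2 then some x else some m := by
  rw [PySem.List.min?] at h ⊢
  rw [List.foldl_append]
  simp only [List.foldl_cons, List.foldl_nil, h]

-- head of the stable sort is Python's min (first minimal element)
theorem pv_sorted_head_min : ∀ (xs : List (String × Int)) {m : String × Int} {t : List (String × Int)},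
    PySem.List.sorted xs (fun x => x.2) false = m :: t →
    PySem.List.min? xs (fun x => x.2) = some m := by
  intro xs
  induction xs using List.reverseRecOn with
  | nil =>
    intro m t h
    rw [show PySem.List.sorted ([] : List (String × Int)) (fun x => x.2) false = [] from rfl] at h
    cases h
  | append_singleton xs x ih =>
    intro m t h
    rw [PySem.List.sorted_eq_foldl_insertBy, List.foldl_append, List.foldl_cons, List.foldl_nil,
        ← PySem.List.sorted_eq_foldl_insertBy] at h
    rcases hs : PySem.List.sorted xs (fun y => y.2) false with _ | ⟨m0, t0⟩
    · have hx : xs = [] := (PySem.List.sorted_eq_nil_iff xs _ false).mp hs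
      subst hx
      rw [hs] at h
      simp [PySem.List.insertBy] at h
      rw [pv_min?_append_none [] x rfl, h.1]
    · rw [hs] at h
      rw [pv_min?_append_some xs x m0 (ih hs)]
      by_cases hlt : x.2 < m0.2
      · simp [PySem.List.insertBy, hlt] at h ⊢
        exact h.1
      · simp [PySem.List.insertBy, hlt] at h ⊢
        exact h.1

theorem pv_insertBy_head (bef : (String × Int) → (String × Int) → Bool) (x : String × Int) :
    ∀ l : List (String × Int), (∀ z ∈ l, bef x z) → PySem.List.insertBy bef x l = x :: l := by
  intro l h
  cases l with
  | nil => rfl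
  | cons y ys => simp [PySem.List.insertBy, h y (by simp)]

theorem pv_filter_insertBy (q : String × Int → Bool) (x : String × Int) :
    ∀ l : List (String × Int), l.Pairwise (fun a b => a.2 ≤ b.2) →
    (PySem.List.insertBy (fun a b => decide (a.2 < b.2)) x l).filter q
      = if q x then PySem.List.insertBy (fun a b => decide (a.2 < b.2)) x (l.filter q)
        else l.filter q := by
  intro l
  induction l with
  | nil =>
    intro _
    by_cases hq : q x <;> simp [PySem.List.insertBy, List.filter, hq]
  | cons y ys ih =>
    intro hp
    rw [List.pairwise_cons] at hp
    obtain ⟨hy, hp⟩ := hp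
    by_cases hxy : x.2 < y.2
    · by_cases hqx : q x
      · by_cases hqy : q y
        · simp [PySem.List.insertBy, hxy, List.filter, hqx, hqy]
        · simp [PySem.List.insertBy, hxy, List.filter, hqx, hqy]
          rw [pv_insertBy_head]
          intro z hz
          have hz' : z ∈ ys := List.mem_of_mem_filter hz
          have := hy z hz'
          simp
          omega
      · by_cases hqy : q y <;> simp [PySem.List.insertBy, hxy, List.filter, hqx, hqy]
    · by_cases hqy : q y
      · simp [PySem.List.insertBy, hxy, List.filter, hqy, ih hp]
        by_cases hqx : q x <;> simp [hqx]
      · simp [PySem.List.insertBy, hxy, List.filter, hqy, ih hp]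

-- filtering commutes with the stable sort
theorem pv_sorted_filter (xs : List (String × Int)) (q : String × Int → Bool) :
    (PySem.List.sorted xs (fun x => x.2) false).filter q
      = PySem.List.sorted (xs.filter q) (fun x => x.2) false := by
  induction xs using List.reverseRecOn with
  | nil => rfl
  | append_singleton xs x ih =>
    rw [PySem.List.sorted_eq_foldl_insertBy, List.foldl_append, List.foldl_cons, List.foldl_nil,
        ← PySem.List.sorted_eq_foldl_insertBy]
    have hpw : (PySem.List.sorted xs (fun y => y.2) false).Pairwise (fun a b => a.2 ≤ b.2) :=
      PySem.List.sorted_pairwise xs (fun y => y.2)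
    rw [pv_filter_insertBy q x _ hpw, List.filter_append]
    by_cases hq : q x
    · rw [if_pos hq, show List.filter q [x] = [x] from by simp [List.filter, hq]]
      have e1 : PySem.List.sorted (List.filter q xs ++ [x]) (fun y => y.2) false
          = PySem.List.insertBy (fun a b => decide (a.2 < b.2)) x
              (PySem.List.sorted (List.filter q xs) (fun y => y.2) false) := by
        rw [PySem.List.sorted_eq_foldl_insertBy, List.foldl_append, List.foldl_cons,
            List.foldl_nil, ← PySem.List.sorted_eq_foldl_insertBy]
      rw [e1, ih]
    · rw [if_neg hq, show List.filter q [x] = [] from by simp [List.filter, hq],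
          List.append_nil, ih]

-- A's loop with a seen-set equals the loop from an empty seen-set on the pre-filtered list
theorem pv_aLoop_seen : ∀ (n : Nat) (l : List (String × Int)), l.length ≤ n →
    ∀ (seen : PySem.Set String) (top : List String), top.length < 4 →
    pvALoop seen top l
      = pvALoop PySem.Set.empty top (l.filter (fun p => !(PySem.Set.contains seen p.1))) := by
  intro n
  induction n with
  | zero =>
    intro l hl seen top _
    have hnil : l = [] := List.eq_nil_of_length_eq_zero (Nat.le_zero.mp hl)
    subst hnil; rfl
  | succ n ih =>
    intro l hl seen top htop
    match l with
    | [] => rfl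
    | (label, dist) :: rest =>
      have hrest : rest.length ≤ n := by simp at hl; omega
      have h4 : (top.length == 4) = false := by simp; omega
      by_cases hc : PySem.Set.contains seen label
      · simp only [pvALoop, hc, if_true, h4, Bool.false_eq_true, if_false, List.filter_cons,
          Bool.not_true]
        rw [ih rest hrest seen top htop]
      · have hcE : PySem.Set.contains PySem.Set.empty label = false := rfl
        by_cases hb : top.length + 1 = 4
        · simp only [pvALoop, hc, Bool.false_eq_true, if_false, List.filter_cons, Bool.not_false,
            if_true, hcE, List.length_append, List.length_cons, List.length_nil, Nat.zero_add, hb]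
          simp
        · simp only [pvALoop, hc, Bool.false_eq_true, if_false, List.filter_cons, Bool.not_false,
            if_true, hcE, List.length_append, List.length_cons, List.length_nil, Nat.zero_add]
          have hb' : ((top.length + 1) == 4) = false := by simp; omega
          simp only [hb', Bool.false_eq_true, if_false]
          have hlt : (top ++ [pvAddArticle label ++ " at " ++ PySem.Int.toStr dist ++ " feet"]).length < 4 := by
            simp; omega
          rw [ih rest hrest _ _ hlt,
              ih (rest.filter (fun p => !(PySem.Set.contains seen p.1)))
                (le_trans (List.length_filter_le _ _) hrest) _ _ hlt,
              List.filter_filter]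
          congr 1
          apply List.filter_congr
          intro p _
          simp [PySem.Set.empty, PySem.Set.contains]
          exact Bool.and_comm _ _

theorem pv_bselect_nil : ∀ k : Nat, pvBSelect [] k = [] := by
  intro k; cases k <;> rfl

theorem pv_bselect_len : ∀ (k : Nat) (pool : List (String × Int)), (pvBSelect pool k).length ≤ k := by
  intro k
  induction k with
  | zero => intro pool; simp [pvBSelect]
  | succ k ih =>
    intro pool
    rcases h : PySem.List.min? pool (fun x => x.2) with _ | ⟨l1, d1⟩
    · simp [pvBSelect, h]
    · simp [pvBSelect, h]
      exact ih _

-- MAIN: A's dedup scan over the sorted list is B's repeated min-extraction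
theorem pv_main : ∀ (n : Nat) (xs : List (String × Int)), xs.length ≤ n →
    ∀ (top : List String), top.length < 4 →
    pvALoop PySem.Set.empty top (PySem.List.sorted xs (fun x => x.2) false)
      = top ++ pvBSelect xs (4 - top.length) := by
  intro n
  induction n with
  | zero =>
    intro xs hxs top htop
    have hnil : xs = [] := List.eq_nil_of_length_eq_zero (Nat.le_zero.mp hxs)
    subst hnil
    simp [pvALoop, pv_bselect_nil,
      show PySem.List.sorted ([] : List (String × Int)) (fun x => x.2) false = [] from rfl]
  | succ n ih =>
    intro xs hxs top htop
    rcases hs : PySem.List.sorted xs (fun x => x.2) false with _ | ⟨⟨label, dist⟩, t⟩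
    · have hnil : xs = [] := (PySem.List.sorted_eq_nil_iff _ _ _).mp hs
      subst hnil
      simp [pvALoop, pv_bselect_nil]
    · have hmin := pv_sorted_head_min xs hs
      have hcE : PySem.Set.contains PySem.Set.empty label = false := rfl
      have hk : 4 - top.length = (4 - (top.length + 1)) + 1 := by omega
      have hfeq : pvAddArticle label = pvAddArticleB label := pv_article_eq label
      rw [hk]
      simp only [pvBSelect, hmin, pvALoop, hcE, Bool.false_eq_true, if_false,
        List.length_append, List.length_cons, List.length_nil, Nat.zero_add]
      by_cases hb : top.length + 1 = 4
      · have hk0 : 4 - (top.length + 1) = 0 := by omega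
        simp only [hb, hk0, pvBSelect, beq_self_eq_true, if_true]
        simp [hfeq]
      · have hb' : ((top.length + 1) == 4) = false := by simp; omega
        simp only [hb', Bool.false_eq_true, if_false]
        have hlt : (top ++ [pvAddArticle label ++ " at " ++ PySem.Int.toStr dist ++ " feet"]).length < 4 := by
          simp; omega
        rw [pv_aLoop_seen t.length t le_rfl _ _ hlt]
        have hq : (t.filter (fun p => !(PySem.Set.contains (PySem.Set.add PySem.Set.empty label) p.1)))
            = t.filter (fun p => p.1 != label) := by
          apply List.filter_congr
          intro p _
          by_cases hd : p.1 = label <;>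
            simp [hd, PySem.Set.add, PySem.Set.contains, PySem.Set.empty]
        rw [hq]
        have hfull : t.filter (fun p => p.1 != label)
            = (PySem.List.sorted xs (fun x => x.2) false).filter (fun p => p.1 != label) := by
          rw [hs, List.filter_cons]
          simp
        rw [hfull, pv_sorted_filter]
        have hmem : (label, dist) ∈ xs := by
          have : (label, dist) ∈ PySem.List.sorted xs (fun x => x.2) false := by
            rw [hs]; exact List.mem_cons_self
          exact (PySem.List.sorted_perm xs (fun x => x.2) false).mem_iff.mp this
        have hflen : (xs.filter (fun p => p.1 != label)).length ≤ n := by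
          obtain ⟨l1, l2, rfl⟩ := List.append_of_mem hmem
          have g1 := List.length_filter_le (fun p : String × Int => p.1 != label) l1
          have g2 := List.length_filter_le (fun p : String × Int => p.1 != label) l2
          simp [List.filter_append, List.filter_cons] at *
          omega
        rw [ih _ hflen _ hlt]
        have hlen' : 4 - (top ++ [pvAddArticle label ++ " at " ++ PySem.Int.toStr dist ++ " feet"]).length
            = 4 - (top.length + 1) := by simp
        rw [hlen']
        simp [hfeq]

-- helpers for the final sentence: join on one/two/three parts
theorem pv_join_one (a : String) : PySem.Str.join ", " [a] = a := by
  apply pv_str_ext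
  simp [PySem.Str.join, PySem.Chars.join, List.intercalate, List.intersperse]

theorem pv_join_two (a b : String) : PySem.Str.join ", " [a, b] = a ++ ", " ++ b := by
  apply pv_str_ext
  simp [PySem.Str.join, PySem.Chars.join, List.intercalate, List.intersperse]

theorem pv_join_three (a b c : String) :
    PySem.Str.join ", " [a, b, c] = a ++ ", " ++ b ++ ", " ++ c := by
  apply pv_str_ext
  simp [PySem.Str.join, PySem.Chars.join, List.intercalate, List.intersperse]

-- ===== VERDICT (by name: the statement is the Claim_ definition above) =====
theorem format_group_spec : Claim_equal_format_group := by
  unfold Claim_equal_format_group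
  intro items direction _
  unfold Spec_format_group
  by_cases hnil : items = []
  · simp [format_group, format_group_alt, hnil]
  · have hmain := pv_main items.length items le_rfl [] (by norm_num)
    simp only [List.nil_append, List.length_nil, Nat.sub_zero] at hmain
    have hmain' : pvALoop [] [] (PySem.List.sorted items (fun x => x.2) false)
        = pvBSelect items 4 := hmain
    have hne : pvBSelect items 4 ≠ [] := by
      rcases hm : PySem.List.min? items (fun x => x.2) with _ | ⟨l1, d1⟩
      · exact absurd ((PySem.List.min?_eq_none_iff _ _).mp hm) hnil
      · simp [pvBSelect, hm]
    have hlen : (pvBSelect items 4).length ≤ 4 := pv_bselect_len 4 items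
    unfold format_group format_group_alt
    rw [if_neg hnil, if_neg hnil]
    rcases hp : pvBSelect items 4 with _ | ⟨a, rest⟩
    · exact absurd hp hne
    · rw [hp] at hlen
      simp only [List.length_cons] at hlen
      rcases rest with _ | ⟨b, rest⟩
      · have hr : PySem.List.pyRange 1 1 1 = [] := by decide
        simp [hmain', hp, hr, PySem.List.pyGetD, PySem.List.pyGet?, PySem.List.pyIdx?]
      · rcases rest with _ | ⟨c, rest⟩
        · have hr : PySem.List.pyRange 1 2 1 = [1] := by decide
          have hc1 : ((1 : Int) == (2 : Int) - 1) = true := by decide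
          simp [hmain', hp, hr, hc1, PySem.List.pyGetD, PySem.List.pyGet?, PySem.List.pyIdx?,
            PySem.List.slice, pv_join_one]
        · rcases rest with _ | ⟨d, rest⟩
          · have hr : PySem.List.pyRange 1 3 1 = [1, 2] := by decide
            have hc1 : ((1 : Int) == (3 : Int) - 1) = false := by decide
            have hc2 : ((2 : Int) == (3 : Int) - 1) = true := by decide
            simp [hmain', hp, hr, hc1, hc2, PySem.List.pyGetD, PySem.List.pyGet?,
              PySem.List.pyIdx?, PySem.List.slice, pv_join_two]
          · rcases rest with _ | ⟨e, rest⟩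
            · have hr : PySem.List.pyRange 1 4 1 = [1, 2, 3] := by decide
              have hc1 : ((1 : Int) == (4 : Int) - 1) = false := by decide
              have hc2 : ((2 : Int) == (4 : Int) - 1) = false := by decide
              have hc3 : ((3 : Int) == (4 : Int) - 1) = true := by decide
              simp [hmain', hp, hr, hc1, hc2, hc3, PySem.List.pyGetD, PySem.List.pyGet?,
                PySem.List.pyIdx?, PySem.List.slice, pv_join_three]
            · simp at hlen
              omega
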